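-- pv_equiv track=rewrite | github.com/SiciliaLeco/Information_Retrieval | hw#4/query_util.py | get_token_info_for_phrase
-- ===== SOURCE A (Python) =====
-- from math import log10, sqrt
--
-- def get_token_info_for_phrase(prev_len, prev_positions, curr_positions):
--     """
--     This method is used for phrase search.
--
--     Returns the intersection of two position list. A match is found when a
--     position from prev_position + prev_len is the same as another position
--     from curr_positions.
--
--     Returns the number of matches and the starting position of the matches.
--     """
--     count = 0
--     pos = []
--
--     i = 0
--     j = 0
--
--     len1 = len(prev_positions)
--     len2 = len(curr_positions)
--
--     skip_len1 = int(sqrt(len1))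
--     skip_len2 = int(sqrt(len2))
--
--     while i < len1 and j < len2:
--         pos1 = prev_positions[i]
--         pos2 = curr_positions[j]
--
--         if pos1 + prev_len == pos2:
--             pos.append(pos1)
--             count += 1
--             i += 1
--             j += 1
--         elif pos1 + prev_len < pos2:
--             skip_ptr = get_skip_pointer(len1, skip_len1, i)
--             if skip_ptr is not None and prev_positions[skip_ptr] + prev_len <= pos2:
--                 i = skip_ptr
--             else:
--                 i += 1
--         else:
--             skip_ptr = get_skip_pointer(len2, skip_len2, j)
--             if skip_ptr is not None and curr_positions[skip_ptr] <= pos1 + prev_len: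
--                 j = skip_ptr
--             else:
--                 j += 1
--
--     return (count, pos)
--
-- def get_skip_pointer(max_len, skip_len, i):
--     """
--     Calculates skip pointer index on the fly.
--     """
--     if i % skip_len == 0 and (i + skip_len) < max_len and skip_len > 1:
--         return i + skip_len
--     else:
--         return None
-- ===== SOURCE B (Python) =====
-- from math import sqrt
--
-- def _blocks(xs):
--     """Materialize the sqrt-skip structure: chunk xs into blocks of int(sqrt(len(xs)))."""
--     s = int(sqrt(len(xs)))
--     return [xs[k:k + s] for k in range(0, len(xs), s)] if s else []
--
-- def get_token_info_for_phrase(prev_len, prev_positions, curr_positions):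
--     B1 = _blocks(prev_positions)
--     B2 = _blocks(curr_positions)
--     pos = []
--     b1 = o1 = b2 = o2 = 0
--     while b1 < len(B1) and b2 < len(B2):
--         x = B1[b1][o1] + prev_len
--         y = B2[b2][o2]
--         if x == y:
--             pos.append(B1[b1][o1])
--             o1 += 1
--             o2 += 1
--         elif x < y:
--             if o1 == 0 and b1 + 1 < len(B1) and B1[b1 + 1][0] + prev_len <= y:
--                 b1 += 1
--             else:
--                 o1 += 1
--         else:
--             if o2 == 0 and b2 + 1 < len(B2) and B2[b2 + 1][0] <= x:
--                 b2 += 1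
--             else:
--                 o2 += 1
--         if b1 < len(B1) and o1 == len(B1[b1]):
--             b1 += 1
--             o1 = 0
--         if b2 < len(B2) and o2 == len(B2[b2]):
--             b2 += 1
--             o2 = 0
--     return (len(pos), pos)
-- ===== Notes on version B (the rewrite author's own statement) =====
-- stated objective: alternative
-- what changed: B materializes A's on-the-fly sqrt skip pointers as an explicit two-level skip list: each input is chunked once into sqrt-sized blocks and the merge walks (block, offset) cursors with whole-block hops, eliminating the index-modulo test, the skip-pointer helper and its skip_len>1 special case; equivalent on all inputs via the state bijection i = block*sqrt + offset.
import Mathlib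
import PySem

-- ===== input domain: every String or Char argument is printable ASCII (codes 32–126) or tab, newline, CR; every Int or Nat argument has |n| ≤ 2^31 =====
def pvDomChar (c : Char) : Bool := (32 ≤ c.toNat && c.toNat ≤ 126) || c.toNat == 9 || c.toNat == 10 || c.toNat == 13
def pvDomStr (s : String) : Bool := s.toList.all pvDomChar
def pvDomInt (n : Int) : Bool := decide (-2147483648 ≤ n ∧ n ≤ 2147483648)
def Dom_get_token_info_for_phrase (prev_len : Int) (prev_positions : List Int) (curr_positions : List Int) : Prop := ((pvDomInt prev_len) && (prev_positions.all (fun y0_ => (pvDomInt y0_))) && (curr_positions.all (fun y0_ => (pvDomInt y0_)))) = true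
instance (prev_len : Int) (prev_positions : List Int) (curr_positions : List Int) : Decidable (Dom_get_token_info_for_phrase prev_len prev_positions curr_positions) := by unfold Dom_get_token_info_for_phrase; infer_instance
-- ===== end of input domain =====

-- B materializes A's on-the-fly sqrt skip pointers as an explicit two-level skip list:
-- both inputs are chunked once into sqrt-sized blocks and the merge walks (block, offset)
-- cursors with whole-block hops — no index modulo, no skip-pointer helper, no skip_len > 1
-- special case (objective: alternative; same cost).

-- ===== PORT A =====
-- helper get_skip_pointer; indices are Nats (Python's i, j start at 0 and only grow).
-- Lean's Nat '%' agrees with Python's here: A only calls it with skip_len = int(sqrt(len)) ≥ 1.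
def get_skip_pointer (max_len : Nat) (skip_len : Nat) (i : Nat) : Option Nat :=
  if i % skip_len == 0 && (i + skip_len) < max_len && skip_len > 1 then
    some (i + skip_len)
  else
    none

-- used by the loop's decreasing_by
theorem get_skip_pointer_some {m s i p : Nat} (h : get_skip_pointer m s i = some p) :
    i < p ∧ p < m := by
  unfold get_skip_pointer at h
  split at h
  · rename_i hc
    simp only [Bool.and_eq_true, decide_eq_true_eq, Nat.lt_iff_add_one_le] at hc
    cases h
    omega
  · exact absurd h (by simp)

-- the while loop of A; getD is exact because every index used is < the list's length
def phraseLoop (prev_len : Int) (prev curr : List Int) (len1 len2 skip1 skip2 : Nat)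
    (i j : Nat) (count : Int) (pos : List Int) : Int × List Int :=
  if _hij : i < len1 ∧ j < len2 then
    let pos1 := prev.getD i 0
    let pos2 := curr.getD j 0
    if pos1 + prev_len = pos2 then
      phraseLoop prev_len prev curr len1 len2 skip1 skip2 (i+1) (j+1) (count+1) (pos ++ [pos1])
    else if pos1 + prev_len < pos2 then
      match hsp1 : get_skip_pointer len1 skip1 i with
      | some sp =>
          if prev.getD sp 0 + prev_len ≤ pos2 then
            phraseLoop prev_len prev curr len1 len2 skip1 skip2 sp j count pos
          else
            phraseLoop prev_len prev curr len1 len2 skip1 skip2 (i+1) j count pos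
      | none =>
          phraseLoop prev_len prev curr len1 len2 skip1 skip2 (i+1) j count pos
    else
      match hsp2 : get_skip_pointer len2 skip2 j with
      | some sp =>
          if curr.getD sp 0 ≤ pos1 + prev_len then
            phraseLoop prev_len prev curr len1 len2 skip1 skip2 i sp count pos
          else
            phraseLoop prev_len prev curr len1 len2 skip1 skip2 i (j+1) count pos
      | none =>
          phraseLoop prev_len prev curr len1 len2 skip1 skip2 i (j+1) count pos
  else
    (count, pos)
termination_by (len1 - i) + (len2 - j)
decreasing_by
  all_goals (try omega)
  all_goals
    (obtain ⟨h1, h2⟩ := get_skip_pointer_some (show get_skip_pointer _ _ _ = some _ by assumption)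
     omega)

-- int(sqrt(n)) = Nat.sqrt n exactly for every list length representable here
def get_token_info_for_phrase (prev_len : Int) (prev_positions : List Int) (curr_positions : List Int) : Int × List Int :=
  phraseLoop prev_len prev_positions curr_positions
    prev_positions.length curr_positions.length
    (Nat.sqrt prev_positions.length) (Nat.sqrt curr_positions.length)
    0 0 0 []

-- ===== PORT B =====
-- _blocks of Source B: [xs[k:k+s] for k in range(0, len(xs), s)] if s else []
def blocksOf (xs : List Int) : List (List Int) :=
  let s : Nat := Nat.sqrt xs.length
  if s = 0 then []
  else (PySem.List.pyRange 0 (xs.length : Int) (s : Int)).map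
    (fun k => PySem.List.slice xs (some k) (some (k + (s : Int))))

-- the two trailing 'if … : b += 1; o = 0' normalization lines of Source B's loop body
def wrapCursor (B : List (List Int)) (b o : Nat) : Nat × Nat :=
  if b < B.length ∧ o = (B.getD b []).length then (b + 1, 0) else (b, o)

-- the while loop of Source B; fuel is only a totality guard: every iteration consumes at least
-- one element, so len(prev)+len(curr)+1 steps are never exhausted
def blockLoop (plen : Int) (B1 B2 : List (List Int)) :
    Nat → Nat → Nat → Nat → Nat → List Int → List Int
  | 0, _, _, _, _, pos => pos
  | fuel+1, b1, o1, b2, o2, pos =>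
    if b1 < B1.length ∧ b2 < B2.length then
      let x := (B1.getD b1 []).getD o1 0 + plen
      let y := (B2.getD b2 []).getD o2 0
      if x = y then
        blockLoop plen B1 B2 fuel
          (wrapCursor B1 b1 (o1+1)).1 (wrapCursor B1 b1 (o1+1)).2
          (wrapCursor B2 b2 (o2+1)).1 (wrapCursor B2 b2 (o2+1)).2
          (pos ++ [(B1.getD b1 []).getD o1 0])
      else if x < y then
        if o1 = 0 ∧ b1 + 1 < B1.length ∧ (B1.getD (b1+1) []).getD 0 0 + plen ≤ y then
          blockLoop plen B1 B2 fuel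
            (wrapCursor B1 (b1+1) o1).1 (wrapCursor B1 (b1+1) o1).2
            (wrapCursor B2 b2 o2).1 (wrapCursor B2 b2 o2).2 pos
        else
          blockLoop plen B1 B2 fuel
            (wrapCursor B1 b1 (o1+1)).1 (wrapCursor B1 b1 (o1+1)).2
            (wrapCursor B2 b2 o2).1 (wrapCursor B2 b2 o2).2 pos
      else
        if o2 = 0 ∧ b2 + 1 < B2.length ∧ (B2.getD (b2+1) []).getD 0 0 ≤ x then
          blockLoop plen B1 B2 fuel
            (wrapCursor B1 b1 o1).1 (wrapCursor B1 b1 o1).2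
            (wrapCursor B2 (b2+1) o2).1 (wrapCursor B2 (b2+1) o2).2 pos
        else
          blockLoop plen B1 B2 fuel
            (wrapCursor B1 b1 o1).1 (wrapCursor B1 b1 o1).2
            (wrapCursor B2 b2 (o2+1)).1 (wrapCursor B2 b2 (o2+1)).2 pos
    else pos

def get_token_info_for_phrase_alt (prev_len : Int) (prev_positions : List Int) (curr_positions : List Int) : Int × List Int :=
  let B1 := blocksOf prev_positions
  let B2 := blocksOf curr_positions
  let pos := blockLoop prev_len B1 B2
    (prev_positions.length + curr_positions.length + 1) 0 0 0 0 []
  ((pos.length : Int), pos)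

-- ===== PRECONDITION & SPEC =====
def Spec_get_token_info_for_phrase (prev_len : Int) (prev_positions : List Int) (curr_positions : List Int) (out : Int × List Int) : Prop := out = get_token_info_for_phrase_alt prev_len prev_positions curr_positions
instance (prev_len : Int) (prev_positions : List Int) (curr_positions : List Int) (out : Int × List Int) : Decidable (Spec_get_token_info_for_phrase prev_len prev_positions curr_positions out) := by unfold Spec_get_token_info_for_phrase; infer_instance

-- ===== CLAIM =====
def Claim_equal_get_token_info_for_phrase : Prop := ∀ (prev_len : Int) (prev_positions : List Int) (curr_positions : List Int), Dom_get_token_info_for_phrase prev_len prev_positions curr_positions → Spec_get_token_info_for_phrase prev_len prev_positions curr_positions (get_token_info_for_phrase prev_len prev_positions curr_positions)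

-- ===== LEMMAS AND PROOFS =====

-- structural facts about blocksOf
theorem blocksOf_lt_iff (xs : List Int) (b : Nat) :
    b < (blocksOf xs).length ↔ b * Nat.sqrt xs.length < xs.length := by
  unfold blocksOf
  set s := Nat.sqrt xs.length with hs
  set n := xs.length with hn
  by_cases h0 : s = 0
  · have : n = 0 := by
      have h0' : Nat.sqrt n = 0 := by rw [← hs]; exact h0
      have := Nat.sqrt_eq_zero.mp h0'
      omega
    simp [h0, this]
  · rw [if_neg h0]
    rw [PySem.List.pyRange_of_pos 0 (n : Int) (by exact_mod_cast Nat.pos_of_ne_zero h0)]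
    simp only [List.length_map, List.length_range]
    by_cases hn0 : n = 0
    · simp [hn0]
    · rw [if_pos (by exact_mod_cast Nat.pos_of_ne_zero hn0)]
      have hcast : ((n : Int) - 0 + (s : Int) - 1) = ((n + s - 1 : Nat) : Int) := by
        omega
      rw [hcast]
      have hdiv : ((n + s - 1 : Nat) : Int) / (s : Int) = (((n + s - 1) / s : Nat) : Int) := by
        exact Int.ofNat_ediv_ofNat
      rw [hdiv, Int.toNat_natCast]
      have hq : b < (n + s - 1) / s ↔ (b + 1) * s ≤ n + s - 1 := by
        rw [Nat.lt_iff_add_one_le, Nat.le_div_iff_mul_le (Nat.pos_of_ne_zero h0)]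
      have hbs : (b + 1) * s = b * s + s := by ring
      rw [hq, hbs]
      omega

theorem blocksOf_getD (xs : List Int) (b : Nat) (hb : b < (blocksOf xs).length) :
    (blocksOf xs).getD b [] = (xs.drop (b * Nat.sqrt xs.length)).take (Nat.sqrt xs.length) := by
  have hb' := hb
  unfold blocksOf at hb' ⊢
  set s := Nat.sqrt xs.length with hs
  set n := xs.length with hn
  by_cases h0 : s = 0
  · simp [h0] at hb'
  · rw [if_neg h0] at hb' ⊢
    rw [PySem.List.pyRange_of_pos 0 (n : Int) (by exact_mod_cast Nat.pos_of_ne_zero h0)] at hb' ⊢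
    simp only [List.length_map, List.length_range] at hb'
    rw [List.getD_eq_getElem _ _ (by simpa using hb')]
    rw [List.getElem_map, List.getElem_map, List.getElem_range]
    have hcast : ((0 : Int) + (s : Int) * (b : Int)) = ((s * b : Nat) : Int) := by push_cast; ring
    rw [hcast]
    have hcast2 : ((s * b : Nat) : Int) + (s : Int) = ((s * b : Nat) : Int) + ((s : Nat) : Int) := rfl
    rw [hcast2, PySem.List.slice_natCast_add xs (s * b) s, Nat.mul_comm s b]

theorem blocksOf_block_length (xs : List Int) (b : Nat) (hb : b < (blocksOf xs).length) :
    ((blocksOf xs).getD b []).length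
      = min (Nat.sqrt xs.length) (xs.length - b * Nat.sqrt xs.length) := by
  rw [blocksOf_getD xs b hb]
  simp

theorem blocksOf_elem (xs : List Int) (b o : Nat) (hb : b < (blocksOf xs).length)
    (ho : o < ((blocksOf xs).getD b []).length) :
    ((blocksOf xs).getD b []).getD o 0 = xs.getD (b * Nat.sqrt xs.length + o) 0 := by
  rw [blocksOf_getD xs b hb] at ho ⊢
  simp only [List.length_take, List.length_drop, lt_min_iff] at ho
  rw [List.getD_eq_getElem _ _ (by simp; omega)]
  rw [List.getElem_take, List.getElem_drop]
  rw [List.getD_eq_getElem _ _ (by omega)]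

-- the cursor (b, o) of B represents the flat index i of A
def CursorInv (xs : List Int) (B : List (List Int)) (s : Nat) (b o i : Nat) : Prop :=
  (b < B.length ∧ o < (B.getD b []).length ∧ i = b * s + o) ∨
  (B.length ≤ b ∧ xs.length ≤ i)

theorem cursorInv_lt {xs : List Int} {b o i : Nat}
    (h : CursorInv xs (blocksOf xs) (Nat.sqrt xs.length) b o i) :
    i < xs.length ↔ b < (blocksOf xs).length := by
  rcases h with ⟨hb, ho, hi⟩ | ⟨hb, hi⟩
  · have hlen := blocksOf_block_length xs b hb
    have hlt := (blocksOf_lt_iff xs b).mp hb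
    constructor
    · intro _; exact hb
    · intro _; rw [hlen] at ho; omega
  · constructor
    · intro h1; omega
    · intro h1; omega

theorem wrapCursor_noop {B : List (List Int)} {b o : Nat}
    (h : ¬ (b < B.length ∧ o = (B.getD b []).length)) : wrapCursor B b o = (b, o) := by
  unfold wrapCursor
  rw [if_neg h]

-- stepping one element forward preserves the representation
theorem wrap_inv (xs : List Int) {b o i : Nat}
    (hb : b < (blocksOf xs).length) (ho : o < ((blocksOf xs).getD b []).length)
    (hi : i = b * Nat.sqrt xs.length + o) :
    CursorInv xs (blocksOf xs) (Nat.sqrt xs.length)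
      (wrapCursor (blocksOf xs) b (o+1)).1 (wrapCursor (blocksOf xs) b (o+1)).2 (i+1) := by
  have hlen := blocksOf_block_length xs b hb
  have hbs := (blocksOf_lt_iff xs b).mp hb
  have hmul : (b + 1) * Nat.sqrt xs.length = b * Nat.sqrt xs.length + Nat.sqrt xs.length := by
    ring
  have hspos : 0 < Nat.sqrt xs.length := by
    rcases Nat.eq_zero_or_pos (Nat.sqrt xs.length) with h | h
    · omega
    · exact h
  by_cases hw : o + 1 = ((blocksOf xs).getD b []).length
  · rw [show wrapCursor (blocksOf xs) b (o+1) = (b+1, 0) from if_pos ⟨hb, hw⟩]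
    dsimp only
    by_cases hb1 : b + 1 < (blocksOf xs).length
    · have hnext := (blocksOf_lt_iff xs (b+1)).mp hb1
      left
      refine ⟨hb1, ?_, ?_⟩
      · rw [blocksOf_block_length xs (b+1) hb1]
        omega
      · omega
    · have hnb1 : ¬ (b+1) * Nat.sqrt xs.length < xs.length :=
        fun hcon => hb1 ((blocksOf_lt_iff xs (b+1)).mpr hcon)
      right
      exact ⟨by omega, by omega⟩
  · rw [wrapCursor_noop (fun hcon => hw hcon.2)]
    dsimp only
    left
    exact ⟨hb, by omega, by omega⟩


theorem gsp_eq_some {m s i p : Nat} :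
    get_skip_pointer m s i = some p ↔ (i % s = 0 ∧ i + s < m ∧ 1 < s) ∧ p = i + s := by
  unfold get_skip_pointer
  by_cases hc : i % s = 0 ∧ i + s < m ∧ 1 < s
  · rw [if_pos (by simp [hc.1, hc.2.1, hc.2.2])]
    simp [hc, eq_comm]
  · rw [if_neg (by
      simp only [Bool.and_eq_true, beq_iff_eq, decide_eq_true_eq]
      intro h
      exact hc ⟨h.1.1, h.1.2, h.2⟩)]
    simp [hc]

theorem gsp_eq_none {m s i : Nat} :
    get_skip_pointer m s i = none ↔ ¬ (i % s = 0 ∧ i + s < m ∧ 1 < s) := by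
  unfold get_skip_pointer
  by_cases hc : i % s = 0 ∧ i + s < m ∧ 1 < s
  · rw [if_pos (by simp [hc.1, hc.2.1, hc.2.2])]
    simp [hc]
  · rw [if_neg (by
      simp only [Bool.and_eq_true, beq_iff_eq, decide_eq_true_eq]
      intro h
      exact hc ⟨h.1.1, h.1.2, h.2⟩)]
    simp [hc]

-- the simulation: B's block walk produces exactly the pos list of A's index walk
theorem blockLoop_sim (plen : Int) (prev curr : List Int) :
    ∀ (fuel i j b1 o1 b2 o2 : Nat) (count : Int) (pos : List Int),
      CursorInv prev (blocksOf prev) (Nat.sqrt prev.length) b1 o1 i →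
      CursorInv curr (blocksOf curr) (Nat.sqrt curr.length) b2 o2 j →
      (prev.length - i) + (curr.length - j) < fuel →
      blockLoop plen (blocksOf prev) (blocksOf curr) fuel b1 o1 b2 o2 pos
        = (phraseLoop plen prev curr prev.length curr.length
            (Nat.sqrt prev.length) (Nat.sqrt curr.length) i j count pos).2 := by
  intro fuel
  induction fuel with
  | zero => intro i j b1 o1 b2 o2 count pos h1 h2 hf; omega
  | succ fuel ih =>
    intro i j b1 o1 b2 o2 count pos h1 h2 hf
    by_cases hbr : b1 < (blocksOf prev).length ∧ b2 < (blocksOf curr).length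
    · obtain ⟨hb1, hb2⟩ := hbr
      have h1' := h1
      have h2' := h2
      rcases h1 with ⟨_, ho1, hi⟩ | ⟨hged, _⟩
      swap
      · omega
      rcases h2 with ⟨_, ho2, hj⟩ | ⟨hged, _⟩
      swap
      · omega
      have hi_lt : i < prev.length := (cursorInv_lt h1').mpr hb1
      have hj_lt : j < curr.length := (cursorInv_lt h2').mpr hb2
      have hs1pos : 0 < Nat.sqrt prev.length := by
        rcases Nat.eq_zero_or_pos (Nat.sqrt prev.length) with h | h
        · have := Nat.sqrt_eq_zero.mp h
          omega
        · exact h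
      have hs2pos : 0 < Nat.sqrt curr.length := by
        rcases Nat.eq_zero_or_pos (Nat.sqrt curr.length) with h | h
        · have := Nat.sqrt_eq_zero.mp h
          omega
        · exact h
      have hlen1 := blocksOf_block_length prev b1 hb1
      have hlen2 := blocksOf_block_length curr b2 hb2
      have he1 : ((blocksOf prev).getD b1 []).getD o1 0 = prev.getD i 0 := by
        rw [blocksOf_elem prev b1 o1 hb1 ho1, ← hi]
      have he2 : ((blocksOf curr).getD b2 []).getD o2 0 = curr.getD j 0 := by
        rw [blocksOf_elem curr b2 o2 hb2 ho2, ← hj]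
      rw [phraseLoop, dif_pos ⟨hi_lt, hj_lt⟩]
      simp only [blockLoop]
      rw [if_pos ⟨hb1, hb2⟩]
      rw [he1, he2]
      by_cases heq : prev.getD i 0 + plen = curr.getD j 0
      · rw [if_pos heq, if_pos heq]
        exact ih (i+1) (j+1) _ _ _ _ (count+1) (pos ++ [prev.getD i 0])
          (wrap_inv prev hb1 ho1 hi) (wrap_inv curr hb2 ho2 hj) (by omega)
      · rw [if_neg heq, if_neg heq]
        have hw2noop : wrapCursor (blocksOf curr) b2 o2 = (b2, o2) :=
          wrapCursor_noop (by intro hc; omega)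
        have hw1noop : wrapCursor (blocksOf prev) b1 o1 = (b1, o1) :=
          wrapCursor_noop (by intro hc; omega)
        have ho1s : o1 < Nat.sqrt prev.length := by omega
        have ho2s : o2 < Nat.sqrt curr.length := by omega
        have hmod1 : i % Nat.sqrt prev.length = o1 := by
          rw [hi, Nat.mul_comm, Nat.mul_add_mod, Nat.mod_eq_of_lt ho1s]
        have hmod2 : j % Nat.sqrt curr.length = o2 := by
          rw [hj, Nat.mul_comm, Nat.mul_add_mod, Nat.mod_eq_of_lt ho2s]
        by_cases hlt : prev.getD i 0 + plen < curr.getD j 0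
        · -- prev side advances
          rw [if_pos hlt, if_pos hlt]
          by_cases hjmp : o1 = 0 ∧ b1 + 1 < (blocksOf prev).length ∧
              ((blocksOf prev).getD (b1+1) []).getD 0 0 + plen ≤ curr.getD j 0
          · rw [if_pos hjmp]
            obtain ⟨ho10, hb11, hval⟩ := hjmp
            have hnb := (blocksOf_lt_iff prev (b1+1)).mp hb11
            have hmul : (b1+1) * Nat.sqrt prev.length
                = b1 * Nat.sqrt prev.length + Nat.sqrt prev.length := by ring
            have hb1len : 0 < ((blocksOf prev).getD (b1+1) []).length := by
              rw [blocksOf_block_length prev (b1+1) hb11]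
              omega
            have hnextval : ((blocksOf prev).getD (b1+1) []).getD 0 0
                = prev.getD ((b1+1) * Nat.sqrt prev.length) 0 := by
              have := blocksOf_elem prev (b1+1) 0 hb11 hb1len
              simpa using this
            have hnexti : (b1+1) * Nat.sqrt prev.length = i + Nat.sqrt prev.length := by
              omega
            have hw1 : wrapCursor (blocksOf prev) (b1+1) o1 = (b1+1, o1) :=
              wrapCursor_noop (by intro hc; omega)
            rw [hw1, hw2noop]
            dsimp only
            have hinv1 : CursorInv prev (blocksOf prev) (Nat.sqrt prev.length)
                (b1+1) o1 (i + Nat.sqrt prev.length) := by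
              left
              exact ⟨hb11, by omega, by omega⟩
            split
            · rename_i sp hsp
              obtain ⟨⟨_, _, _⟩, hspv⟩ := gsp_eq_some.mp hsp
              subst hspv
              rw [if_pos (by rw [← hnexti, ← hnextval]; exact hval)]
              exact ih (i + Nat.sqrt prev.length) j (b1+1) o1 b2 o2 count pos
                hinv1 h2' (by omega)
            · rename_i hnone
              have hnc := gsp_eq_none.mp hnone
              -- the jump was legal, so only 1 < s can fail: s1 = 1 and the hop is a unit step
              have hs1one : Nat.sqrt prev.length = 1 := by
                have h1 : i % Nat.sqrt prev.length = 0 := by omega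
                have h2 : i + Nat.sqrt prev.length < prev.length := by omega
                by_contra hne
                exact hnc ⟨h1, h2, by omega⟩
              have : i + Nat.sqrt prev.length = i + 1 := by omega
              rw [this] at hinv1
              exact ih (i+1) j (b1+1) o1 b2 o2 count pos hinv1 h2' (by omega)
          · rw [if_neg hjmp]
            rw [hw2noop]
            dsimp only
            have hstep := wrap_inv prev hb1 ho1 hi
            split
            · rename_i sp hsp
              obtain ⟨⟨hm0, hsn, hs1⟩, hspv⟩ := gsp_eq_some.mp hsp
              subst hspv
              by_cases hv : prev.getD (i + Nat.sqrt prev.length) 0 + plen ≤ curr.getD j 0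
              · exfalso
                apply hjmp
                have ho10 : o1 = 0 := by omega
                have hmul : (b1+1) * Nat.sqrt prev.length
                    = b1 * Nat.sqrt prev.length + Nat.sqrt prev.length := by ring
                have hb11 : b1 + 1 < (blocksOf prev).length := by
                  rw [blocksOf_lt_iff]
                  omega
                have hb1len : 0 < ((blocksOf prev).getD (b1+1) []).length := by
                  rw [blocksOf_block_length prev (b1+1) hb11]
                  have := (blocksOf_lt_iff prev (b1+1)).mp hb11
                  omega
                have hnextval : ((blocksOf prev).getD (b1+1) []).getD 0 0
                    = prev.getD ((b1+1) * Nat.sqrt prev.length) 0 := by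
                  have := blocksOf_elem prev (b1+1) 0 hb11 hb1len
                  simpa using this
                refine ⟨ho10, hb11, ?_⟩
                rw [hnextval, show (b1+1) * Nat.sqrt prev.length = i + Nat.sqrt prev.length by omega]
                exact hv
              · rw [if_neg hv]
                exact ih (i+1) j _ _ b2 o2 count pos hstep h2' (by omega)
            · exact ih (i+1) j _ _ b2 o2 count pos hstep h2' (by omega)
        · -- curr side advances
          rw [if_neg hlt, if_neg hlt]
          by_cases hjmp : o2 = 0 ∧ b2 + 1 < (blocksOf curr).length ∧
              ((blocksOf curr).getD (b2+1) []).getD 0 0 ≤ prev.getD i 0 + plen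
          · rw [if_pos hjmp]
            obtain ⟨ho20, hb21, hval⟩ := hjmp
            have hnb := (blocksOf_lt_iff curr (b2+1)).mp hb21
            have hmul : (b2+1) * Nat.sqrt curr.length
                = b2 * Nat.sqrt curr.length + Nat.sqrt curr.length := by ring
            have hb2len : 0 < ((blocksOf curr).getD (b2+1) []).length := by
              rw [blocksOf_block_length curr (b2+1) hb21]
              omega
            have hnextval : ((blocksOf curr).getD (b2+1) []).getD 0 0
                = curr.getD ((b2+1) * Nat.sqrt curr.length) 0 := by
              have := blocksOf_elem curr (b2+1) 0 hb21 hb2len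
              simpa using this
            have hnextj : (b2+1) * Nat.sqrt curr.length = j + Nat.sqrt curr.length := by
              omega
            have hw2 : wrapCursor (blocksOf curr) (b2+1) o2 = (b2+1, o2) :=
              wrapCursor_noop (by intro hc; omega)
            rw [hw1noop, hw2]
            dsimp only
            have hinv2 : CursorInv curr (blocksOf curr) (Nat.sqrt curr.length)
                (b2+1) o2 (j + Nat.sqrt curr.length) := by
              left
              exact ⟨hb21, by omega, by omega⟩
            split
            · rename_i sp hsp
              obtain ⟨⟨_, _, _⟩, hspv⟩ := gsp_eq_some.mp hsp
              subst hspv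
              rw [if_pos (by rw [← hnextj, ← hnextval]; exact hval)]
              exact ih i (j + Nat.sqrt curr.length) b1 o1 (b2+1) o2 count pos
                h1' hinv2 (by omega)
            · rename_i hnone
              have hnc := gsp_eq_none.mp hnone
              have hs2one : Nat.sqrt curr.length = 1 := by
                have h1 : j % Nat.sqrt curr.length = 0 := by omega
                have h2 : j + Nat.sqrt curr.length < curr.length := by omega
                by_contra hne
                exact hnc ⟨h1, h2, by omega⟩
              have : j + Nat.sqrt curr.length = j + 1 := by omega
              rw [this] at hinv2
              exact ih i (j+1) b1 o1 (b2+1) o2 count pos h1' hinv2 (by omega)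
          · rw [if_neg hjmp]
            rw [hw1noop]
            dsimp only
            have hstep := wrap_inv curr hb2 ho2 hj
            split
            · rename_i sp hsp
              obtain ⟨⟨hm0, hsn, hs2⟩, hspv⟩ := gsp_eq_some.mp hsp
              subst hspv
              by_cases hv : curr.getD (j + Nat.sqrt curr.length) 0 ≤ prev.getD i 0 + plen
              · exfalso
                apply hjmp
                have ho20 : o2 = 0 := by omega
                have hmul : (b2+1) * Nat.sqrt curr.length
                    = b2 * Nat.sqrt curr.length + Nat.sqrt curr.length := by ring
                have hb21 : b2 + 1 < (blocksOf curr).length := by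
                  rw [blocksOf_lt_iff]
                  omega
                have hb2len : 0 < ((blocksOf curr).getD (b2+1) []).length := by
                  rw [blocksOf_block_length curr (b2+1) hb21]
                  have := (blocksOf_lt_iff curr (b2+1)).mp hb21
                  omega
                have hnextval : ((blocksOf curr).getD (b2+1) []).getD 0 0
                    = curr.getD ((b2+1) * Nat.sqrt curr.length) 0 := by
                  have := blocksOf_elem curr (b2+1) 0 hb21 hb2len
                  simpa using this
                refine ⟨ho20, hb21, ?_⟩
                rw [hnextval, show (b2+1) * Nat.sqrt curr.length = j + Nat.sqrt curr.length by omega]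
                exact hv
              · rw [if_neg hv]
                exact ih i (j+1) b1 o1 _ _ count pos h1' hstep (by omega)
            · exact ih i (j+1) b1 o1 _ _ count pos h1' hstep (by omega)
    · have hni : ¬ (i < prev.length ∧ j < curr.length) := by
        intro hc
        exact hbr ⟨(cursorInv_lt h1).mp hc.1, (cursorInv_lt h2).mp hc.2⟩
      rw [phraseLoop, dif_neg hni]
      simp only [blockLoop]
      rw [if_neg hbr]

-- A's running count is the length of its accumulated pos list
theorem phraseLoop_fst (plen : Int) (prev curr : List Int) (s1 s2 : Nat) :
    ∀ (fuel i j : Nat) (pos : List Int),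
      (prev.length - i) + (curr.length - j) ≤ fuel →
      (phraseLoop plen prev curr prev.length curr.length s1 s2 i j ((pos.length : Int)) pos).1
        = ((phraseLoop plen prev curr prev.length curr.length s1 s2 i j ((pos.length : Int)) pos).2.length : Int) := by
  intro fuel
  induction fuel with
  | zero =>
    intro i j pos h
    rw [phraseLoop, dif_neg (by omega)]
  | succ fuel ih =>
    intro i j pos h
    by_cases hij : i < prev.length ∧ j < curr.length
    · rw [phraseLoop, dif_pos hij]
      dsimp only
      by_cases heq : prev.getD i 0 + plen = curr.getD j 0
      · rw [if_pos heq]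
        have hcast : ((pos.length : Int)) + 1 = (((pos ++ [prev.getD i 0]).length : Nat) : Int) := by
          simp
        rw [hcast]
        exact ih (i+1) (j+1) _ (by omega)
      · rw [if_neg heq]
        by_cases hlt : prev.getD i 0 + plen < curr.getD j 0
        · rw [if_pos hlt]
          split
          · rename_i sp hsp
            have := get_skip_pointer_some hsp
            split
            · exact ih sp j pos (by omega)
            · exact ih (i+1) j pos (by omega)
          · exact ih (i+1) j pos (by omega)
        · rw [if_neg hlt]
          split
          · rename_i sp hsp
            have := get_skip_pointer_some hsp
            split
            · exact ih i sp pos (by omega)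
            · exact ih i (j+1) pos (by omega)
          · exact ih i (j+1) pos (by omega)
    · rw [phraseLoop, dif_neg hij]

-- the initial cursor (0,0) represents index 0
theorem cursorInv_init (xs : List Int) :
    CursorInv xs (blocksOf xs) (Nat.sqrt xs.length) 0 0 0 := by
  rcases Nat.eq_zero_or_pos xs.length with h | h
  · right
    have hiff := blocksOf_lt_iff xs 0
    constructor
    · omega
    · omega
  · left
    have hb : 0 < (blocksOf xs).length := (blocksOf_lt_iff xs 0).mpr (by omega)
    refine ⟨hb, ?_, by omega⟩
    rw [blocksOf_block_length xs 0 hb]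
    have hs : 0 < Nat.sqrt xs.length := by
      rcases Nat.eq_zero_or_pos (Nat.sqrt xs.length) with h0 | h0
      · have := Nat.sqrt_eq_zero.mp h0
        omega
      · exact h0
    omega

-- ===== VERDICT (by name: the statement is the Claim_ definition above) =====
theorem get_token_info_for_phrase_spec : Claim_equal_get_token_info_for_phrase := by
  intro plen prev curr _
  unfold Spec_get_token_info_for_phrase get_token_info_for_phrase get_token_info_for_phrase_alt
  have hsim := blockLoop_sim plen prev curr (prev.length + curr.length + 1)
    0 0 0 0 0 0 0 [] (cursorInv_init prev) (cursorInv_init curr) (by omega)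
  have hfst := phraseLoop_fst plen prev curr (Nat.sqrt prev.length) (Nat.sqrt curr.length)
    (prev.length + curr.length) 0 0 [] (by omega)
  have h0 : ((([] : List Int)).length : Int) = 0 := rfl
  rw [h0] at hfst
  dsimp only
  rw [hsim]
  exact Prod.ext hfst rfl
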